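-- pv_equiv track=rewrite | github.com/flyingrobots/libgitledger | tools/tasks/taskwatch/domain_gh.py | _extract_ac
-- ===== SOURCE A (Python) =====
-- from typing import Dict, List, Optional, Set
--
-- def _extract_ac(body: str) -> Optional[str]:
--     lines = body.splitlines()
--     start = None
--     for i, ln in enumerate(lines):
--         if ln.strip().lower().startswith("## acceptance criteria"):
--             start = i
--             break
--     if start is None:
--         return None
--     out = []
--     for j in range(start, len(lines)):
--         if j > start and lines[j].strip().startswith("## "):
--             break
--         out.append(lines[j])
--     return "\n".join(out).strip()
-- ===== SOURCE B (Python) =====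
-- def _extract_ac(body):
--     found = False
--     out = []
--     for ln in body.splitlines():
--         if not found:
--             if ln.strip().lower().startswith("## acceptance criteria"):
--                 found = True
--                 out.append(ln)
--         elif ln.strip().startswith("## "):
--             break
--         else:
--             out.append(ln)
--     if not found:
--         return None
--     return "\n".join(out).strip()
-- ===== Notes on version B (the rewrite author's own statement) =====
-- stated objective: simpler
-- what changed: Replaces A's two sequential passes (index search via enumerate, then an index-range copy loop) with a single pass over the lines driven by a found flag, with no index arithmetic.
import Mathlib
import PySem

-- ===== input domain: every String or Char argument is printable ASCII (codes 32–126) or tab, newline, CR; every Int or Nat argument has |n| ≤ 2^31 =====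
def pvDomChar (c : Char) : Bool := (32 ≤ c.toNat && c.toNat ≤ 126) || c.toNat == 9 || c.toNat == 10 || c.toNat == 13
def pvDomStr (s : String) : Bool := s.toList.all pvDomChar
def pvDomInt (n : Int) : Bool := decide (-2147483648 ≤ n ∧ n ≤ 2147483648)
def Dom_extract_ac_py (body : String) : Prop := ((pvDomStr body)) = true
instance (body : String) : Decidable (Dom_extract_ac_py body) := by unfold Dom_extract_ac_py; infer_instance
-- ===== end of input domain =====

-- B replaces A's two sequential passes (index search, then an index-range copy) by one
-- single-pass loop over the lines with a found flag; objective: simpler (no index arithmetic).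

-- ===== PORT A =====
-- first loop: 'for i, ln in enumerate(lines): if … : start = i; break'
def aFind : List String → Nat → Option Nat
  | [], _ => none
  | ln :: rest, i =>
    if PySem.Str.startswith (PySem.Str.lower (PySem.Str.strip ln)) "## acceptance criteria" then
      some i
    else aFind rest (i + 1)

-- second loop: 'for j in range(start, len(lines)): if j > start and …: break; out.append(lines[j])'
def aCollect (lines : List String) (start : Int) : List Int → List String → List String
  | [], out => out
  | j :: rest, out =>
    if j > start ∧ PySem.Str.startswith (PySem.Str.strip (PySem.List.pyGetD lines j "")) "## " then
      out
    else aCollect lines start rest (out ++ [PySem.List.pyGetD lines j ""])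

def extract_ac_py (body : String) : Option String :=
  let lines := PySem.Str.splitlines body
  match aFind lines 0 with
  | none => none
  | some start =>
      some (PySem.Str.strip (PySem.Str.join "\n"
        (aCollect lines (start : Int)
          (PySem.List.pyRange (start : Int) (lines.length : Int) 1) [])))

-- ===== PORT B =====
-- single pass with a found flag; break on a '## ' header once found
def bLoop : List String → Bool → List String → Bool × List String
  | [], found, out => (found, out)
  | ln :: rest, found, out =>
    if !found then
      if PySem.Str.startswith (PySem.Str.lower (PySem.Str.strip ln)) "## acceptance criteria" then
        bLoop rest true (out ++ [ln])
      else bLoop rest found out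
    else if PySem.Str.startswith (PySem.Str.strip ln) "## " then
      (found, out)
    else bLoop rest found (out ++ [ln])

def extract_ac_py_alt (body : String) : Option String :=
  let r := bLoop (PySem.Str.splitlines body) false []
  if r.1 then some (PySem.Str.strip (PySem.Str.join "\n" r.2)) else none

-- ===== PRECONDITION & SPEC =====
def Spec_extract_ac_py (body : String) (out : Option String) : Prop := out = extract_ac_py_alt body
instance (body : String) (out : Option String) : Decidable (Spec_extract_ac_py body out) := by unfold Spec_extract_ac_py; infer_instance

-- ===== CLAIM (what is proved, stated in full; the proofs are below) =====
def Claim_equal_extract_ac_py : Prop := ∀ (body : String), Dom_extract_ac_py body → Spec_extract_ac_py body (extract_ac_py body)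

-- ===== LEMMAS AND PROOFS =====

lemma bLoop_found (ls : List String) : ∀ (out : List String),
    bLoop ls true out
      = (true, out ++ ls.takeWhile (fun ln => !(PySem.Str.startswith (PySem.Str.strip ln) "## "))) := by
  induction ls with
  | nil => intro out; simp [bLoop]
  | cons l rest ih =>
    intro out
    simp only [bLoop, Bool.not_true, Bool.false_eq_true, if_false]
    by_cases h : PySem.Str.startswith (PySem.Str.strip l) "## " = true
    · rw [if_pos h, List.takeWhile_cons_of_neg (by simpa using h)]
      simp
    · rw [if_neg h, ih, List.takeWhile_cons_of_pos (by simpa using h)]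
      simp

lemma aCollect_tail : ∀ (n : Nat) (lines : List String) (k : Nat) (start : Int) (out : List String),
    lines.length - k ≤ n → start < (k : Int) →
    aCollect lines start (PySem.List.pyRange (k : Int) (lines.length : Int) 1) out
      = out ++ (lines.drop k).takeWhile (fun ln => !(PySem.Str.startswith (PySem.Str.strip ln) "## ")) := by
  intro n
  induction n with
  | zero =>
    intro lines k start out hn _
    have hk : lines.length ≤ k := by omega
    rw [PySem.List.pyRange_one_eq_nil (by exact_mod_cast hk)]
    simp [aCollect, List.drop_eq_nil_of_le hk]
  | succ n ih =>
    intro lines k start out hn hs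
    by_cases hk : k < lines.length
    · rw [PySem.List.pyRange_one_cons (by exact_mod_cast hk)]
      have hget : PySem.List.pyGetD lines (k : Int) "" = lines[k] := by
        rw [PySem.List.pyGetD_natCast]; exact List.getD_eq_getElem lines "" hk
      have hdrop : lines.drop k = lines[k] :: lines.drop (k + 1) :=
        (List.getElem_cons_drop hk).symm
      have hcast : ((k : Int) + 1) = ((k + 1 : Nat) : Int) := by push_cast; ring
      simp only [aCollect, hget]
      by_cases h2 : PySem.Str.startswith (PySem.Str.strip lines[k]) "## " = true
      · rw [if_pos ⟨hs, h2⟩, hdrop, List.takeWhile_cons_of_neg (by simpa using h2)]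
        simp
      · rw [if_neg (fun hc => h2 hc.2), hcast,
          ih lines (k + 1) start (out ++ [lines[k]]) (by omega) (by push_cast; omega),
          hdrop, List.takeWhile_cons_of_pos (by simpa using h2)]
        simp
    · have hk' : lines.length ≤ k := by omega
      rw [PySem.List.pyRange_one_eq_nil (by exact_mod_cast hk')]
      simp [aCollect, List.drop_eq_nil_of_le hk']

lemma aCollect_start (lines : List String) (s : Nat) (hs : s < lines.length) :
    aCollect lines (s : Int) (PySem.List.pyRange (s : Int) (lines.length : Int) 1) []
      = lines[s] :: (lines.drop (s + 1)).takeWhile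
          (fun ln => !(PySem.Str.startswith (PySem.Str.strip ln) "## ")) := by
  rw [PySem.List.pyRange_one_cons (by exact_mod_cast hs)]
  have hget : PySem.List.pyGetD lines (s : Int) "" = lines[s] := by
    rw [PySem.List.pyGetD_natCast]; exact List.getD_eq_getElem lines "" hs
  have hcast : ((s : Int) + 1) = ((s + 1 : Nat) : Int) := by push_cast; ring
  simp only [aCollect, hget]
  rw [if_neg (fun hc => lt_irrefl _ hc.1), List.nil_append, hcast,
    aCollect_tail (lines.length - (s + 1)) lines (s + 1) (s : Int) [lines[s]]
      (by omega) (by push_cast; omega)]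
  simp

lemma aFind_succ (ls : List String) : ∀ (k : Nat),
    aFind ls (k + 1) = (aFind ls k).map (· + 1) := by
  induction ls with
  | nil => intro k; simp [aFind]
  | cons l rest ih =>
    intro k
    simp only [aFind]
    split_ifs with h
    · simp
    · exact ih (k + 1)

lemma aFind_lt : ∀ (ls : List String) (s : Nat), aFind ls 0 = some s → s < ls.length := by
  intro ls
  induction ls with
  | nil => intro s h; simp [aFind] at h
  | cons l rest ih =>
    intro s h
    simp only [aFind] at h
    split_ifs at h with h1
    · cases h; simp
    · rw [aFind_succ rest 0] at h
      cases hr : aFind rest 0 with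
      | none => rw [hr] at h; simp at h
      | some t =>
        rw [hr] at h
        simp only [Option.map_some, Option.some.injEq] at h
        have := ih t hr
        simp only [List.length_cons]
        omega

lemma main_core : ∀ (lines : List String),
    (match aFind lines 0 with
     | none => (none : Option String)
     | some start =>
        some (PySem.Str.strip (PySem.Str.join "\n"
          (aCollect lines (start : Int)
            (PySem.List.pyRange (start : Int) (lines.length : Int) 1) []))))
    = (let r := bLoop lines false []
       if r.1 then some (PySem.Str.strip (PySem.Str.join "\n" r.2)) else none) := by
  intro lines
  induction lines with
  | nil => simp [aFind, bLoop]
  | cons l ls ih =>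
    by_cases h1 : PySem.Str.startswith (PySem.Str.lower (PySem.Str.strip l)) "## acceptance criteria" = true
    · -- header found at the head
      have hA : aFind (l :: ls) 0 = some 0 := by simp only [aFind]; rw [if_pos h1]
      have hc := aCollect_start (l :: ls) 0 (by simp)
      have hB : bLoop (l :: ls) false []
          = (true, l :: ls.takeWhile (fun ln => !(PySem.Str.startswith (PySem.Str.strip ln) "## "))) := by
        simp only [bLoop, Bool.not_false, if_true]
        rw [if_pos h1, bLoop_found]
        simp
      simp only [hA, Nat.cast_zero] at *
      rw [hc, hB]
      simp
    · -- head does not match: both sides reduce to the tail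
      have hA : aFind (l :: ls) 0 = (aFind ls 0).map (· + 1) := by
        simp only [aFind]
        rw [if_neg h1, aFind_succ ls 0]
      have hB : bLoop (l :: ls) false [] = bLoop ls false [] := by
        simp only [bLoop, Bool.not_false, if_true]
        rw [if_neg h1]
      cases hr : aFind ls 0 with
      | none =>
        simp only [hA, hr, Option.map_none, hB]
        rw [← ih, hr]
      | some s =>
        have hslt : s < ls.length := aFind_lt ls s hr
        have hc1 := aCollect_start (l :: ls) (s + 1) (by simp only [List.length_cons]; omega)
        have hc2 := aCollect_start ls s hslt
        simp only [hr] at ih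
        rw [hc2] at ih
        simp only [hA, hr, Option.map_some]
        rw [hc1]
        simp only [List.getElem_cons_succ, List.drop_succ_cons, hB]
        exact ih

-- ===== VERDICT (by name: the statement is the Claim_ definition above) =====
theorem extract_ac_py_spec : Claim_equal_extract_ac_py := by
  intro body _
  unfold Spec_extract_ac_py extract_ac_py extract_ac_py_alt
  exact main_core (PySem.Str.splitlines body)
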